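-- pv_equiv track=rewrite | github.com/zero-to-dev/Algorithm | companies/KAKAO/2022-KAKAO-TECH-INTERNSHIP/Lv.-4-행렬과-연산/sunman-short4.py | solution
-- ===== SOURCE A (Python) =====
-- from collections import deque
--
-- def solution(rc, operations):
--     left = deque([r[0] for r in rc])
--     right = deque([r[-1] for r in rc])
--     body = deque([deque(r[1:-1]) for r in rc])
--     for op in operations:
--         if op == "Rotate":
--             body[0].appendleft(left.popleft())
--             right.appendleft(body[0].pop())
--             body[-1].append(right.pop())
--             left.append(body[-1].popleft())
--         elif op == "ShiftRow":
--             left.appendleft(left.pop())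
--             right.appendleft(right.pop())
--             body.appendleft(body.pop())
--     answer = list([left[r]] + list(body[r]) + [right[r]] for r in range(len(rc)))
--     return answer
-- ===== SOURCE B (Python) =====
-- def solution(rc, operations):
--     # Rebuilds the matrix row by row for each operation instead of maintaining
--     # A's left/right/body deques: each row is taken as first + middle + last
--     # (the three columns the operations act on); Rotate gives every row the
--     # head of the row below and the last element of the row above; ShiftRow
--     # cycles the rows.
--     grid = [[r[0], *r[1:-1], r[-1]] for r in rc]
--     for op in operations:
--         if op == "Rotate":
--             grid = ([[grid[1][0]] + grid[0][:-1]]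
--                     + [[nxt[0]] + row[1:-1] + [prv[-1]]
--                        for prv, row, nxt in zip(grid, grid[1:-1], grid[2:])]
--                     + [grid[-1][1:-1] + [grid[-1][-1], grid[-2][-1]]])
--         elif op == "ShiftRow":
--             grid = grid[-1:] + grid[:-1]
--     return grid
-- ===== Notes on version B (the rewrite author's own statement) =====
-- stated objective: alternative
-- what changed: Replaces A's three-deque simulation (left column, per-row body deques, right column, mutated in place per operation) by a direct list-of-rows algorithm: rows are normalised to first+middle+last once, each Rotate rebuilds every row from its neighbours (head of the row below, last element of the row above), each ShiftRow cycles the row list; the trade is a plain row-level rebuild against A's O(1)-per-op deque bookkeeping.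
-- outside the precondition, e.g. on solution([[1, 2, 3]], ['Rotate']): A returns [[1, 3, 2]], B raises IndexError
import Mathlib
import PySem

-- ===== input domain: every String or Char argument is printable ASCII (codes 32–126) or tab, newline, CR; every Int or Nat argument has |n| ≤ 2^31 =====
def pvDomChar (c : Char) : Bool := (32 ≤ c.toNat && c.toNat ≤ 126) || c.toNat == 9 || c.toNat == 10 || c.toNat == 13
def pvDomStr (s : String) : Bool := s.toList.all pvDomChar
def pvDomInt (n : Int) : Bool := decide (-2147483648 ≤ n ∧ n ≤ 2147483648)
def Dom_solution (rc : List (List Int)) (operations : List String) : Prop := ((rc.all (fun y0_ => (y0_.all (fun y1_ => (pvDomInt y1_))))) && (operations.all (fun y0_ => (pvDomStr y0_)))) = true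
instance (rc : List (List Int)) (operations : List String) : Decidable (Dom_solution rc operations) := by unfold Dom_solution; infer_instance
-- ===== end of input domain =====

-- B replaces A's three-deque (left/body/right) simulation by a direct list-of-rows
-- algorithm (rows normalised to first+middle+last, each Rotate rebuilds every row from its
-- neighbours, each ShiftRow cycles the row list); an alternative of similar cost.


-- ===== PORT A =====
-- one iteration of A's loop on the state (left, body, right)
def stepA (st : List Int × List (List Int) × List Int) (op : String) :
    List Int × List (List Int) × List Int :=
  let (L, B, R) := st
  if op = "Rotate" then
    -- body[0].appendleft(left.popleft())
    let b0a := L.headD 0 :: B.headD []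
    let L1 := L.tail
    -- right.appendleft(body[0].pop())
    let t := b0a.getLastD 0
    let B1 := B.set 0 b0a.dropLast
    let R1 := t :: R
    -- body[-1].append(right.pop())
    let r := R1.getLastD 0
    let R2 := R1.dropLast
    let B2 := B1.set (B1.length - 1) (B1.getLastD [] ++ [r])
    -- left.append(body[-1].popleft())
    let bn2 := B2.getLastD []
    let L2 := L1 ++ [bn2.headD 0]
    let B3 := B2.set (B2.length - 1) bn2.tail
    (L2, B3, R2)
  else if op = "ShiftRow" then
    (L.getLastD 0 :: L.dropLast, B.getLastD [] :: B.dropLast, R.getLastD 0 :: R.dropLast)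
  else
    (L, B, R)

def solution (rc : List (List Int)) (operations : List String) : List (List Int) :=
  let left := rc.map (fun r => r.headD 0)              -- r[0]
  let right := rc.map (fun r => r.getLastD 0)          -- r[-1]
  let body := rc.map (fun r => (r.drop 1).dropLast)    -- r[1:-1]
  let st := operations.foldl stepA (left, body, right)
  (List.range rc.length).map (fun i => st.1.getD i 0 :: (st.2.1.getD i [] ++ [st.2.2.getD i 0]))

-- ===== PORT B =====
-- one iteration of B's loop on the grid (list of rows)
def stepB (grid : List (List Int)) (op : String) : List (List Int) :=
  if op = "Rotate" then
    -- [grid[1][0]] + grid[0][:-1]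
    ((grid.getD 1 []).headD 0 :: (grid.headD []).dropLast)
      -- [[nxt[0]] + row[1:-1] + [prv[-1]] for prv, row, nxt in zip(grid, grid[1:-1], grid[2:])]
      :: (List.zipWith3 (fun prv row nxt => nxt.headD 0 :: (row.tail.dropLast ++ [prv.getLastD 0]))
            grid ((grid.drop 1).dropLast) (grid.drop 2)
          -- [grid[-1][1:-1] + [grid[-1][-1], grid[-2][-1]]]
          ++ [(grid.getD (grid.length - 1) []).tail.dropLast
               ++ [(grid.getD (grid.length - 1) []).getLastD 0,
                   (grid.getD (grid.length - 2) []).getLastD 0]])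
  else if op = "ShiftRow" then
    grid.drop (grid.length - 1) ++ grid.dropLast
  else
    grid

def solution_alt (rc : List (List Int)) (operations : List String) : List (List Int) :=
  -- grid = [[r[0], *r[1:-1], r[-1]] for r in rc]
  let grid := rc.map (fun r => r.headD 0 :: ((r.drop 1).dropLast ++ [r.getLastD 0]))
  operations.foldl stepB grid

-- ===== PRECONDITION & SPEC =====
-- Pre_ requires every row to be non-empty (on an empty row A raises IndexError), a non-empty
-- matrix when a "ShiftRow" occurs (A raises on deque.pop), and at least 2 rows when a "Rotate"
-- occurs: on a single-row Rotate (the published problem guarantees ≥ 2 rows and columns) A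
-- returns an accidental value of its left/body/right decomposition while B's neighbouring-row
-- formula raises; that corner is excluded and cited.
def Pre_solution (rc : List (List Int)) (operations : List String) : Prop :=
  (∀ r ∈ rc, r ≠ []) ∧
  ("Rotate" ∈ operations → 2 ≤ rc.length) ∧
  ("ShiftRow" ∈ operations → rc ≠ [])
instance (rc : List (List Int)) (operations : List String) : Decidable (Pre_solution rc operations) := by
  unfold Pre_solution; infer_instance
def pvWitness_solution : List (List Int) × List String := ([[1, 2], [3, 4]], ["Rotate", "ShiftRow"])

def Spec_solution (rc : List (List Int)) (operations : List String) (out : List (List Int)) : Prop := out = solution_alt rc operations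
instance (rc : List (List Int)) (operations : List String) (out : List (List Int)) : Decidable (Spec_solution rc operations out) := by unfold Spec_solution; infer_instance

-- ===== CLAIM (what is proved, stated in full; the proofs are below) =====
def Claim_equal_solution : Prop := ∀ (rc : List (List Int)) (operations : List String), Dom_solution rc operations → Pre_solution rc operations → Spec_solution rc operations (solution rc operations)

-- ===== LEMMAS AND PROOFS =====

-- decomposition of a grid into A's state
def decL (M : List (List Int)) : List Int := M.map (fun r => r.headD 0)
def decT (M : List (List Int)) : List Int := M.map (fun r => r.getLastD 0)
def decB (M : List (List Int)) : List (List Int) := M.map (fun r => (r.drop 1).dropLast)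

-- every row of length ≥ 2 has the shape a :: u ++ [b]
theorem row_shape (r : List Int) (h : 2 ≤ r.length) :
    ∃ a u b, r = a :: (u ++ [b]) := by
  match r, h with
  | a :: t, h =>
    rcases t.eq_nil_or_concat with rfl | ⟨u, b, rfl⟩
    · simp at h
    · exact ⟨a, u, b, by simp⟩

theorem getLastD_irrel {α : Type} (a : α) (l : List α) (d d' : α) :
    (a :: l).getLastD d = (a :: l).getLastD d' := by simp [List.getLastD]

theorem set_last (x : List Int) (ys : List (List Int)) (z w : List Int) :
    (x :: (ys ++ [z])).set (ys.length + 1) w = x :: (ys ++ [w]) := by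
  induction ys generalizing x with
  | nil => rfl
  | cons y ys ih => simpa using ih y

-- the row-lists of length ≥ 2 preserved along B's fold
theorem zip3_maps (ls : List Int) (rows : List (List Int)) (rs : List Int)
    (h1 : ls.length = rows.length) (h2 : rows.length ≤ rs.length) :
    (List.zipWith3 (fun l row r => l :: ((row.tail.dropLast) ++ [r])) ls rows rs).map (fun r => r.headD 0) = ls ∧
    (List.zipWith3 (fun l row r => l :: ((row.tail.dropLast) ++ [r])) ls rows rs).map (fun r => r.tail.dropLast) = rows.map (fun r => r.tail.dropLast) ∧
    (List.zipWith3 (fun l row r => l :: ((row.tail.dropLast) ++ [r])) ls rows rs).map (fun r => r.getLastD 0) = rs.take rows.length ∧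
    (List.zipWith3 (fun l row r => l :: ((row.tail.dropLast) ++ [r])) ls rows rs).length = rows.length ∧
    ∀ r ∈ List.zipWith3 (fun l row r => l :: ((row.tail.dropLast) ++ [r])) ls rows rs, 2 ≤ r.length := by
  induction ls generalizing rows rs with
  | nil =>
    cases rows with
    | nil => simp [List.zipWith3]
    | cons r rows => simp at h1
  | cons l ls ih =>
    cases rows with
    | nil => simp at h1
    | cons row rows =>
      cases rs with
      | nil => simp at h2
      | cons r rs =>
        simp only [List.length_cons, Nat.succ_le_succ_iff] at h1 h2
        obtain ⟨ha, hb, hc, hd, he⟩ := ih rows rs (by omega) h2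
        refine ⟨?_, ?_, ?_, ?_, ?_⟩
        · simp only [List.zipWith3, List.map_cons, List.headD_cons, ha]
        · simp only [List.zipWith3, List.map_cons, hb]
          congr 1
          simp
        · simp only [List.zipWith3, List.map_cons, hc, List.length_cons, List.take_succ_cons]
          congr 1
          rw [show l :: (row.tail.dropLast ++ [r]) = (l :: row.tail.dropLast) ++ [r] from rfl]
          exact List.getLastD_concat ..
        · simp only [List.zipWith3, List.length_cons, hd]
        · intro r2 hr2
          simp only [List.zipWith3, List.mem_cons] at hr2
          rcases hr2 with rfl | hr2
          · simp
          · exact he r2 hr2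

-- B's neighbouring-rows zip written with the decomposed head/last columns
theorem zip_conv (bs : List (List Int)) : ∀ (as cs : List (List Int)),
    List.zipWith3 (fun prv row nxt => nxt.headD 0 :: (row.tail.dropLast ++ [prv.getLastD 0])) as bs cs
      = List.zipWith3 (fun l row r => l :: (row.tail.dropLast ++ [r]))
          (cs.map (fun r => r.headD 0)) bs (as.map (fun r => r.getLastD 0)) := by
  induction bs with
  | nil => intro as cs; cases as <;> cases cs <;> simp [List.zipWith3]
  | cons b bs ih =>
    intro as cs
    cases as with
    | nil => simp [List.zipWith3]
    | cons a as =>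
      cases cs with
      | nil => simp [List.zipWith3]
      | cons c cs => simp only [List.zipWith3, List.map_cons, ih]

theorem cons_headD_tail {α : Type} (X : List α) (d : α) (h : X ≠ []) :
    X.headD d :: X.tail = X := by cases X <;> simp_all

theorem cons_eq_dropLast_getLastD (a : Int) (l : List Int) :
    a :: l = (a :: l).dropLast ++ [(a :: l).getLastD 0] := by
  induction l generalizing a with
  | nil => rfl
  | cons b l ih => simpa using ih b

theorem getD_cons_concat (x z : List Int) (ys : List (List Int)) (d : List Int) :
    (x :: (ys ++ [z])).getD (ys.length + 1) d = z := by
  induction ys generalizing x with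
  | nil => rfl
  | cons y ys ih => simpa using ih y

theorem getD_cons_pen (x z : List Int) (ys : List (List Int)) (d : List Int) :
    (x :: (ys ++ [z])).getD ys.length d = (x :: ys).getLastD d := by
  induction ys generalizing x with
  | nil => rfl
  | cons y ys ih =>
    simp only [List.length_cons, List.cons_append, List.getD_cons_succ, ih y]
    simp [List.getLastD]

theorem getLastD_map_last (x : List Int) (ys : List (List Int)) :
    ((x :: ys).getLastD []).getLastD 0 = ((x :: ys).map (fun r => r.getLastD 0)).getLastD 0 := by
  induction ys generalizing x with
  | nil => rfl
  | cons y ys ih => simpa [List.getLastD_cons] using ih y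

theorem rot_step (M : List (List Int)) (hn : 2 ≤ M.length) (hrows : ∀ r ∈ M, 2 ≤ r.length) :
    stepA (decL M, decB M, decT M) "Rotate" = (decL (stepB M "Rotate"), decB (stepB M "Rotate"), decT (stepB M "Rotate"))
    ∧ (stepB M "Rotate").length = M.length ∧ ∀ r ∈ stepB M "Rotate", 2 ≤ r.length := by
  obtain ⟨r0, M1, rfl⟩ : ∃ r0 M1, M = r0 :: M1 := by
    cases M with
    | nil => simp at hn
    | cons a b => exact ⟨a, b, rfl⟩
  have hM1 : M1 ≠ [] := by intro e; subst e; simp at hn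
  obtain ⟨mids, rl, hM1e⟩ := M1.eq_nil_or_concat.resolve_left hM1
  rw [List.concat_eq_append] at hM1e
  subst hM1e
  obtain ⟨a0, u0, b0, rfl⟩ := row_shape r0 (hrows r0 (by simp))
  obtain ⟨aN, uN, bN, rfl⟩ := row_shape rl (hrows rl (by simp))
  -- abbreviations for the decomposed middle rows
  set mh := mids.map (fun r => r.headD 0) with hmh
  set mt := mids.map (fun r => r.getLastD 0) with hmt
  set mB := mids.map (fun r => r.tail.dropLast) with hmB
  set V := (mh ++ [aN]).tail with hV
  set w0 := (mh ++ [aN]).headD 0 with hw0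
  set P := (b0 :: mt).dropLast with hP
  set q := (b0 :: mt).getLastD 0 with hq
  have hPq : b0 :: mt = P ++ [q] := cons_eq_dropLast_getLastD b0 mt
  have hVlen : V.length = mids.length := by simp [hV, hmh]
  have hwV : w0 :: V = mh ++ [aN] := cons_headD_tail _ _ (by simp)
  have hmtlen : mt.length = mids.length := by rw [hmt]; simp
  -- step B computes the rotated grid explicitly
  have hB : stepB ((a0 :: (u0 ++ [b0])) :: (mids ++ [aN :: (uN ++ [bN])])) "Rotate" =
      (w0 :: a0 :: u0) ::
        (List.zipWith3 (fun l row r => l :: ((row.tail.dropLast) ++ [r])) V mids (b0 :: (mt ++ [bN]))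
          ++ [(uN ++ [bN]) ++ [q]]) := by
    have hg1 : (((mids ++ [aN :: (uN ++ [bN])]).getD 0 []).headD 0 : Int) = w0 := by
      rw [hw0, hmh]; cases mids <;> simp
    have hdl0 : (a0 :: (u0 ++ [b0])).dropLast = a0 :: u0 := by
      rw [show a0 :: (u0 ++ [b0]) = (a0 :: u0) ++ [b0] by simp, List.dropLast_concat]
    have hlast1 : (aN :: (uN ++ [bN])).tail.dropLast = uN := by simp
    have hlast2 : (aN :: (uN ++ [bN])).getLastD 0 = bN := by simp [List.getLastD]
    have hlenM : ((a0 :: (u0 ++ [b0])) :: (mids ++ [aN :: (uN ++ [bN])])).length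
        = mids.length + 2 := by simp
    have hgetN1 : ((a0 :: (u0 ++ [b0])) :: (mids ++ [aN :: (uN ++ [bN])])).getD
          (mids.length + 1) [] = aN :: (uN ++ [bN]) := getD_cons_concat ..
    have hgetN2 : ((a0 :: (u0 ++ [b0])) :: (mids ++ [aN :: (uN ++ [bN])])).getD
          (mids.length) [] = ((a0 :: (u0 ++ [b0])) :: mids).getLastD [] := getD_cons_pen ..
    have hq2 : ((((a0 :: (u0 ++ [b0])) :: mids).getLastD []).getLastD 0 : Int) = q := by
      rw [getLastD_map_last, hq]
      simp only [List.map_cons, ← hmt]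
      simp [List.getLastD]
    have hmapt : ((a0 :: (u0 ++ [b0])) :: (mids ++ [aN :: (uN ++ [bN])])).map
          (fun r => r.getLastD 0) = b0 :: (mt ++ [bN]) := by
      simp only [List.map_cons, List.map_append, List.map_nil, ← hmt]
      simp [List.getLastD]
    have hmaph : ((((a0 :: (u0 ++ [b0])) :: (mids ++ [aN :: (uN ++ [bN])])).drop 2).map
          (fun r => r.headD 0)) = V := by
      rw [hV, hmh]
      cases mids <;> simp
    simp only [stepB, reduceIte, hlenM, Nat.add_sub_cancel,
      show mids.length + 2 - 1 = mids.length + 1 from rfl, hgetN1, hgetN2,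
      List.getD_cons_succ, List.getD_cons_zero, List.headD_cons, List.drop_one,
      List.tail_cons, List.dropLast_concat, zip_conv, hmapt, hmaph, hg1, hq2,
      hdl0, hlast1, hlast2]
    simp
  rw [hB]
  -- the three decomposed columns of the rotated grid
  obtain ⟨hza, hzb, hzc, hzd, hze⟩ := zip3_maps V mids (b0 :: (mt ++ [bN]))
    (by simp [hVlen]) (by simp [hmtlen]; omega)
  have hA : stepA (decL ((a0 :: (u0 ++ [b0])) :: (mids ++ [aN :: (uN ++ [bN])])),
                   decB ((a0 :: (u0 ++ [b0])) :: (mids ++ [aN :: (uN ++ [bN])])),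
                   decT ((a0 :: (u0 ++ [b0])) :: (mids ++ [aN :: (uN ++ [bN])])))
                  "Rotate" =
      ((mh ++ [aN]) ++ [(uN ++ [bN]).headD 0],
       (a0 :: u0).dropLast :: (mB ++ [(uN ++ [bN]).tail]),
       (a0 :: u0).getLastD 0 :: b0 :: mt) := by
    have hdL : decL ((a0 :: (u0 ++ [b0])) :: (mids ++ [aN :: (uN ++ [bN])])) = a0 :: (mh ++ [aN]) := by
      simp only [decL, List.map_cons, List.map_append, List.map_nil, List.headD_cons, ← hmh]
    have hdB : decB ((a0 :: (u0 ++ [b0])) :: (mids ++ [aN :: (uN ++ [bN])])) = u0 :: (mB ++ [uN]) := by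
      simp only [decB, List.map_cons, List.map_append, List.map_nil, List.drop_one, ← hmB]
      simp
    have hdT : decT ((a0 :: (u0 ++ [b0])) :: (mids ++ [aN :: (uN ++ [bN])])) = b0 :: (mt ++ [bN]) := by
      simp only [decT, List.map_cons, List.map_append, List.map_nil, ← hmt]
      simp [List.getLastD]
    rw [hdL, hdB, hdT]
    simp only [stepA, List.headD_cons, List.tail_cons, List.set_cons_zero, reduceIte]
    have e1 : (((a0 :: u0).getLastD 0) :: b0 :: (mt ++ [bN])).getLastD 0 = bN := by
      simp [List.getLastD]
    have e2 : (((a0 :: u0).getLastD 0) :: b0 :: (mt ++ [bN])).dropLast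
        = ((a0 :: u0).getLastD 0) :: b0 :: mt := by
      rw [show (((a0 :: u0).getLastD 0) :: b0 :: (mt ++ [bN]))
            = ((((a0 :: u0).getLastD 0) :: b0 :: mt) ++ [bN]) by simp, List.dropLast_concat]
    have e4 : ((a0 :: u0).dropLast :: (mB ++ [uN])).getLastD [] = uN := by simp [List.getLastD]
    have e3 : ((a0 :: u0).dropLast :: (mB ++ [uN])).length - 1 = mB.length + 1 := by simp
    rw [e1, e2, e4, e3, set_last]
    have e5 : ((a0 :: u0).dropLast :: (mB ++ [uN ++ [bN]])).getLastD [] = uN ++ [bN] := by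
      simp [List.getLastD]
    have e6 : ((a0 :: u0).dropLast :: (mB ++ [uN ++ [bN]])).length - 1 = mB.length + 1 := by simp
    rw [e5, e6, set_last]
  rw [hA]
  refine ⟨?_, ?_, ?_⟩
  · refine Prod.ext ?_ (Prod.ext ?_ ?_) <;> simp only
    · -- left column
      simp only [decL, List.map_cons, List.map_append, List.map_cons, List.map_nil, hza]
      rw [← hwV]
      simp
    · -- body
      simp only [decB, List.map_cons, List.map_append, List.map_cons, List.map_nil, List.drop_one, hzb]
      have h4 : (uN ++ [bN, q]).tail.dropLast = (uN ++ [bN]).tail := by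
        cases uN <;> simp
      simp [h4, hmB]
    · -- right column
      simp only [decT, List.map_cons, List.map_append, List.map_cons, List.map_nil, hzc]
      have h1 : (w0 :: a0 :: u0).getLastD 0 = (a0 :: u0).getLastD 0 := by
        rw [List.getLastD_cons]; exact getLastD_irrel _ _ _ _
      have h2 : ((uN ++ [bN]) ++ [q]).getLastD 0 = q := List.getLastD_concat ..
      have h3 : (b0 :: (mt ++ [bN])).take mids.length = P := by
        rw [show (b0 :: (mt ++ [bN]) : List Int) = (b0 :: mt) ++ [bN] by simp]
        rw [List.take_append_of_le_length (by simp [hmtlen])]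
        rw [hP, List.dropLast_eq_take]
        rw [show (b0 :: mt).length - 1 = mids.length by simp [hmtlen]]
      rw [h1, h2, h3, ← hPq]
  · -- number of rows preserved
    simp [hzd]
  · -- all rows keep length ≥ 2
    intro r hr
    rcases List.mem_cons.mp hr with rfl | hr2
    · simp
    rcases List.mem_append.mp hr2 with h3 | h3
    · exact hze r h3
    · simp at h3
      subst h3
      simp


theorem shift_dec (M : List (List Int)) (hne : M ≠ []) :
    stepA (decL M, decB M, decT M) "ShiftRow"
      = (decL (stepB M "ShiftRow"), decB (stepB M "ShiftRow"), decT (stepB M "ShiftRow"))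
    ∧ (stepB M "ShiftRow").length = M.length
    ∧ ∀ r ∈ stepB M "ShiftRow", r ∈ M := by
  obtain ⟨ys, z, hM⟩ := M.eq_nil_or_concat.resolve_left hne
  rw [List.concat_eq_append] at hM
  subst hM
  have hB : stepB (ys ++ [z]) "ShiftRow" = z :: ys := by
    simp [stepB, show (ys ++ [z]).length - 1 = ys.length by simp]
  refine ⟨?_, by rw [hB]; simp, ?_⟩
  · rw [hB]
    simp [stepA, decL, decB, decT, List.getLastD_concat, List.dropLast_concat]
  · intro r hr
    rw [hB] at hr
    rcases List.mem_cons.mp hr with rfl | hr2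
    · simp
    · simp [hr2]

theorem fold_dec (ops : List String) : ∀ (M : List (List Int)),
    (∀ r ∈ M, 2 ≤ r.length) → ("Rotate" ∈ ops → 2 ≤ M.length) → ("ShiftRow" ∈ ops → M ≠ []) →
    ops.foldl stepA (decL M, decB M, decT M)
      = (decL (ops.foldl stepB M), decB (ops.foldl stepB M), decT (ops.foldl stepB M))
    ∧ (ops.foldl stepB M).length = M.length ∧ ∀ r ∈ ops.foldl stepB M, 2 ≤ r.length := by
  induction ops with
  | nil => exact fun M h _ _ => ⟨rfl, rfl, h⟩
  | cons op ops ih =>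
    intro M hrows hrot hshift
    have hstep :
        stepA (decL M, decB M, decT M) op = (decL (stepB M op), decB (stepB M op), decT (stepB M op))
        ∧ (stepB M op).length = M.length ∧ ∀ r ∈ stepB M op, 2 ≤ r.length := by
      by_cases h1 : op = "Rotate"
      · subst h1; exact rot_step M (hrot (by simp)) hrows
      · by_cases h2 : op = "ShiftRow"
        · subst h2
          obtain ⟨e, hl, hsub⟩ := shift_dec M (hshift (by simp))
          exact ⟨e, hl, fun r hr => hrows r (hsub r hr)⟩
        · have hb : stepB M op = M := by simp [stepB, h1, h2]
          have ha : stepA (decL M, decB M, decT M) op = (decL M, decB M, decT M) := by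
            simp [stepA, h1, h2]
          rw [hb, ha]
          exact ⟨rfl, rfl, hrows⟩
    obtain ⟨e, hl, hr2⟩ := hstep
    simp only [List.foldl_cons]
    rw [e]
    obtain ⟨e2, hl2, hr3⟩ := ih (stepB M op) hr2
      (fun hm => by rw [hl]; exact hrot (by simp [hm]))
      (fun hm => by
        intro e0
        rw [e0] at hl
        exact (hshift (by simp [hm])) (List.eq_nil_of_length_eq_zero hl.symm))
    exact ⟨e2, by rw [hl2, hl], hr3⟩

theorem recompose (r : List Int) (h : 2 ≤ r.length) :
    r.headD 0 :: (((r.drop 1).dropLast) ++ [r.getLastD 0]) = r := by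
  obtain ⟨a, u, b, rfl⟩ := row_shape r h
  simp [List.getLastD]

theorem rangemap (M : List (List Int)) (hM : ∀ r ∈ M, 2 ≤ r.length) :
    (List.range M.length).map
      (fun i => (decL M).getD i 0 :: ((decB M).getD i [] ++ [(decT M).getD i 0])) = M := by
  induction M with
  | nil => rfl
  | cons r M ih =>
    simp only [List.length_cons, List.range_succ_eq_map, List.map_cons, List.map_map]
    congr 1
    · simpa [decL, decB, decT] using recompose r (hM r (by simp))
    · rw [List.map_congr_left (g := fun i => (decL M).getD i 0 :: ((decB M).getD i [] ++ [(decT M).getD i 0]))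
        (by intro i _; simp [decL, decB, decT, Function.comp])]
      exact ih (fun r hr => hM r (by simp [hr]))

-- ===== VERDICT (by name: the statement is the Claim_ definition above) =====
theorem solution_spec : Claim_equal_solution := by
  intro rc ops _ hpre
  obtain ⟨_, hrot, hshift⟩ := hpre
  show solution rc ops = solution_alt rc ops
  unfold solution solution_alt
  simp only []
  rw [show rc.map (fun r => r.headD 0) = decL rc from rfl,
      show rc.map (fun r => r.getLastD 0) = decT rc from rfl,
      show rc.map (fun r => (r.drop 1).dropLast) = decB rc from rfl]
  -- A's initial state is exactly the decomposition of B's normalised grid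
  have hL : decL (rc.map (fun r => r.headD 0 :: ((r.drop 1).dropLast ++ [r.getLastD 0]))) = decL rc := by
    simp [decL, Function.comp]
  have hB0 : decB (rc.map (fun r => r.headD 0 :: ((r.drop 1).dropLast ++ [r.getLastD 0]))) = decB rc := by
    simp [decB, Function.comp]
  have hT : decT (rc.map (fun r => r.headD 0 :: ((r.drop 1).dropLast ++ [r.getLastD 0]))) = decT rc := by
    simp only [decT, List.map_map]
    refine List.map_congr_left (fun r _ => ?_)
    simp only [Function.comp]
    rw [show r.headD 0 :: ((r.drop 1).dropLast ++ [r.getLastD 0])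
          = (r.headD 0 :: (r.drop 1).dropLast) ++ [r.getLastD 0] by simp]
    exact List.getLastD_concat ..
  rw [← hL, ← hB0, ← hT]
  obtain ⟨heq, hlen, hr2⟩ := fold_dec ops (rc.map (fun r => r.headD 0 :: ((r.drop 1).dropLast ++ [r.getLastD 0])))
    (by intro r hr; obtain ⟨r0, _, rfl⟩ := List.mem_map.mp hr; simp)
    (by intro hm; rw [List.length_map]; exact hrot hm)
    (by intro hm; simpa using hshift hm)
  have hlen2 : rc.length
      = (ops.foldl stepB (rc.map (fun r => r.headD 0 :: ((r.drop 1).dropLast ++ [r.getLastD 0])))).length := by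
    rw [hlen, List.length_map]
  rw [heq, hlen2]
  exact rangemap _ hr2
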